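-- pv_equiv track=rewrite | github.com/Ggilad05/computersProject_Gilad | main.py | Find_bars_names
-- ===== SOURCE A (Python) =====
-- def Find_bars_names(Multilist):#פונקציה שמוצאת את שמות הצירים#
--     x_lable = ""
--     y_lable= ""
--     Clean_xy_multilist=[]
--
--     for box in Multilist:
--         box_2 = []
--         for item in box:
--             stripped_item = item.strip("\n")
--             box_2.append(stripped_item)
--         Clean_xy_multilist.append(box_2)
--
--     for i in Clean_xy_multilist:
--         if i[0]=="x":
--             for item in i[2:]:
--                 x_lable=x_lable+str(item)
--         if i[0]=="y":
--             for item in i[2:]: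
--                 y_lable=y_lable+str(item)
--     return x_lable,y_lable
-- ===== SOURCE B (Python) =====
-- def Find_bars_names(Multilist):
--     # Group-by with a dictionary: pair each box's stripped head with its stripped tail,
--     # index the pairs by head, then assemble each label by a single dict lookup.
--     pairs = []
--     for box in Multilist:
--         stripped = [it.strip("\n") for it in box]
--         pairs.append((stripped[0], stripped[2:]))
--     groups = {}
--     for key, tail in pairs:
--         groups[key] = groups.get(key, []) + [tail]
--     def label(k):
--         return "".join(it for tail in groups.get(k, []) for it in tail)
--     return label("x"), label("y")
-- ===== Notes on version B (the rewrite author's own statement) =====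
-- stated objective: alternative
-- what changed: Replaces A's two dispatch accumulators (and its repeated string += over a pre-built cleaned multilist) by a group-by: boxes are indexed in a dictionary keyed by their stripped head, and each label is assembled afterwards by a single lookup of 'x' resp. 'y' followed by one join.
import Mathlib
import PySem

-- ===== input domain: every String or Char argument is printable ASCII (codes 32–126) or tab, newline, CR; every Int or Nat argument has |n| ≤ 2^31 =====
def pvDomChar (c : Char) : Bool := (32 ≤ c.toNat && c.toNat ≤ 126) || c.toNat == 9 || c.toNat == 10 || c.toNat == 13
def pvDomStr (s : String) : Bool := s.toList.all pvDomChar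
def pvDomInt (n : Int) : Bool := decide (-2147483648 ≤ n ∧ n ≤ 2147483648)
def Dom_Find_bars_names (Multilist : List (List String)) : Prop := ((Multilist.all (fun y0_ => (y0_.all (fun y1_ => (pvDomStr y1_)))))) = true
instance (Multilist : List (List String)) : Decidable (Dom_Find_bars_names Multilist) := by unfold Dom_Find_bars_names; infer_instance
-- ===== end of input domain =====

-- B replaces A's two dispatch accumulators and its cleaned-multilist pass by a group-by:
-- a dictionary indexes the stripped boxes by their head, each label is one lookup + join;
-- objective: alternative (same cost, different data structure).

-- ===== PORT A =====
def Find_bars_names (Multilist : List (List String)) : String × String :=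
  let clean : List (List String) :=
    Multilist.foldl (fun acc box =>
      acc ++ [box.foldl (fun b2 item => b2 ++ [PySem.Str.stripChars item "\n"]) []]) []
  clean.foldl (fun acc i =>
    -- i[0] : Pre_ guarantees every box is nonempty, so headD's default is never used
    let acc1 := if i.headD "" == "x" then
        ((PySem.List.slice i (some 2) none).foldl (fun x it => x ++ it) acc.1, acc.2)
      else acc
    if i.headD "" == "y" then
      (acc1.1, (PySem.List.slice i (some 2) none).foldl (fun y it => y ++ it) acc1.2)
    else acc1) ("", "")

-- ===== PORT B =====
def Find_bars_names_alt (Multilist : List (List String)) : String × String :=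
  let pairs : List (String × List String) :=
    Multilist.foldl (fun ps box =>
      let stripped := box.map (fun it => PySem.Str.stripChars it "\n")
      -- stripped[0] : Pre_ guarantees every box is nonempty; stripped[2:] = List.drop 2
      ps ++ [(stripped.headD "", stripped.drop 2)]) []
  let groups : PySem.Dict String (List (List String)) :=
    pairs.foldl (fun d p => d.modify p.1 [] (· ++ [p.2])) PySem.Dict.empty
  -- label k = "".join over all items of all tails under key k
  (PySem.Str.join "" ((groups.getD "x" []).flatten),
   PySem.Str.join "" ((groups.getD "y" []).flatten))

-- ===== PRECONDITION & SPEC =====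
-- Pre_ excludes inputs containing an empty box: there Python A raises IndexError on i[0]
-- (and Python B raises too, on stripped[0]).
def Pre_Find_bars_names (Multilist : List (List String)) : Prop :=
  (Multilist.all (fun box => !box.isEmpty)) = true
instance (Multilist : List (List String)) : Decidable (Pre_Find_bars_names Multilist) := by
  unfold Pre_Find_bars_names; infer_instance
def pvWitness_Find_bars_names : List (List String) :=
  [["x", "=", "la", "bel\n"], ["y", "=", "time"]]
def Spec_Find_bars_names (Multilist : List (List String)) (out : String × String) : Prop := out = Find_bars_names_alt Multilist
instance (Multilist : List (List String)) (out : String × String) : Decidable (Spec_Find_bars_names Multilist out) := by unfold Spec_Find_bars_names; infer_instance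

-- ===== CLAIM =====
def Claim_equal_Find_bars_names : Prop := ∀ (Multilist : List (List String)), Dom_Find_bars_names Multilist → Pre_Find_bars_names Multilist → Spec_Find_bars_names Multilist (Find_bars_names Multilist)

-- ===== LEMMAS AND PROOFS =====

theorem pv_nil_intercalate (l : List (List Char)) : [].intercalate l = l.flatten := by
  induction l with
  | nil => simp [List.intercalate]
  | cons h t ih => cases t <;> simp_all [List.intercalate, List.intersperse]
theorem pv_join_nil : PySem.Str.join "" ([] : List String) = "" := by decide
theorem pv_join_cons (h : String) (t : List String) :
    PySem.Str.join "" (h :: t) = h ++ PySem.Str.join "" t := by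
  simp [PySem.Str.join, PySem.Chars.join, pv_nil_intercalate, String.ofList_append, String.ofList_toList]
theorem pv_join_append (l1 l2 : List String) :
    PySem.Str.join "" (l1 ++ l2) = PySem.Str.join "" l1 ++ PySem.Str.join "" l2 := by
  induction l1 with
  | nil => simp [pv_join_nil]
  | cons h t ih => simp [pv_join_cons, ih, String.append_assoc]
theorem pv_foldl_strcat (l : List String) (a : String) :
    l.foldl (fun x it => x ++ it) a = a ++ PySem.Str.join "" l := by
  induction l generalizing a with
  | nil => simp [pv_join_nil]
  | cons h t ih => simp [ih, pv_join_cons, String.append_assoc]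
theorem pv_slice_two (i : List String) : PySem.List.slice i (some 2) none = i.drop 2 := by
  rw [PySem.List.slice_from (ha := by norm_num)]; simp

-- tails of the boxes of C whose head is k (what both programs concatenate for label k)
def pvTails (C : List (List String)) (k : String) : List (List String) :=
  (C.filter (fun i => i.headD "" == k)).map (List.drop 2)

theorem pvTails_cons (i : List String) (C : List (List String)) (k : String) :
    pvTails (i :: C) k =
      if i.headD "" == k then i.drop 2 :: pvTails C k else pvTails C k := by
  simp only [pvTails, List.filter_cons]
  split <;> simp_all

-- one step of A's dispatch loop, as a named function (definitionally the port's lambda)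
def pvStepA (acc : String × String) (i : List String) : String × String :=
  let acc1 := if i.headD "" == "x" then
      ((PySem.List.slice i (some 2) none).foldl (fun x it => x ++ it) acc.1, acc.2)
    else acc
  if i.headD "" == "y" then
    (acc1.1, (PySem.List.slice i (some 2) none).foldl (fun y it => y ++ it) acc1.2)
  else acc1

theorem pvStepA_eq (acc : String × String) (i : List String) :
    pvStepA acc i =
      (acc.1 ++ (if i.headD "" == "x" then PySem.Str.join "" (i.drop 2) else ""),
       acc.2 ++ (if i.headD "" == "y" then PySem.Str.join "" (i.drop 2) else "")) := by
  unfold pvStepA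
  simp only [pv_slice_two, pv_foldl_strcat]
  by_cases hx : i.headD "" = "x" <;> by_cases hy : i.headD "" = "y" <;>
    simp_all

-- A's second loop computes, for each label, the join of the matching tails
theorem pv_A_fold (C : List (List String)) (a b : String) :
    C.foldl (fun acc i =>
      let acc1 := if i.headD "" == "x" then
          ((PySem.List.slice i (some 2) none).foldl (fun x it => x ++ it) acc.1, acc.2)
        else acc
      if i.headD "" == "y" then
        (acc1.1, (PySem.List.slice i (some 2) none).foldl (fun y it => y ++ it) acc1.2)
      else acc1) (a, b)
    = (a ++ PySem.Str.join "" (pvTails C "x").flatten,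
       b ++ PySem.Str.join "" (pvTails C "y").flatten) := by
  show C.foldl pvStepA (a, b) = _
  induction C generalizing a b with
  | nil => simp [pvTails, pv_join_nil]
  | cons i t ih =>
    rw [List.foldl_cons, pvStepA_eq, ih]
    by_cases hx : i.headD "" = "x" <;> by_cases hy : i.headD "" = "y" <;>
      simp_all [pvTails_cons, pv_join_append, String.append_assoc]

theorem pv_foldl_snoc {α β : Type} (f : α → β) (l : List α) (acc : List β) :
    l.foldl (fun a x => a ++ [f x]) acc = acc ++ l.map f := by
  induction l generalizing acc with
  | nil => simp
  | cons h t ih => simp [ih]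

-- B's grouping dict holds, under key k, exactly the matching stripped tails
theorem pv_B_group (M : List (List String)) (k : String) :
    ((M.map (fun box =>
        let stripped := box.map (fun it => PySem.Str.stripChars it "\n")
        (stripped.headD "", stripped.drop 2))).foldl
      (fun d p => d.modify p.1 [] (· ++ [p.2])) PySem.Dict.empty).getD k []
    = pvTails (M.map (fun box => box.map (fun it => PySem.Str.stripChars it "\n"))) k := by
  rw [PySem.Dict.getD_foldl_modify_append]
  simp [pvTails, List.filter_map, Function.comp_def]

-- ===== VERDICT =====
theorem Find_bars_names_spec : Claim_equal_Find_bars_names := by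
  intro M _ _
  unfold Spec_Find_bars_names Find_bars_names Find_bars_names_alt
  simp only [pv_foldl_snoc, List.nil_append]
  rw [pv_A_fold, pv_B_group, pv_B_group]
  simp only [String.empty_append]
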